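-- pv_equiv track=rewrite | github.com/Zaetsfit/Course_work | algoritms.py | on_blocks
-- ===== SOURCE A (Python) =====
-- def on_blocks(matr, size):
--     first = []
--     for row in range(int(size / 2)):
--         for column in range(int(size / 2)):
--             first.append(matr[row][column])
--
--     second = []
--     for row in range(int(size / 2)):
--         for column in range(int(size / 2), size):
--             second.append(matr[row][column])
--
--     third = []
--     for row in range(int(size / 2), size):
--         for column in range(int(size / 2)):
--             third.append(matr[row][column])
--
--     fourth = []
--     for row in range(int(size / 2), size):
--         for column in range(int(size / 2), size):
--             fourth.append(matr[row][column])
--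
--     return first, second, third, fourth
-- ===== SOURCE B (Python) =====
-- def _dispatch(quads, half, row, column, v):
--     first, second, third, fourth = quads
--     if row < half:
--         (first if column < half else second).append(v)
--     else:
--         (third if column < half else fourth).append(v)
--
-- def on_blocks(matr, size):
--     half = int(size / 2)
--     quads = ([], [], [], [])
--     for row in range(size):
--         for column in range(size):
--             _dispatch(quads, half, row, column, matr[row][column])
--     return quads
-- ===== Notes on version B (the rewrite author's own statement) =====
-- stated objective: simpler
-- what changed: Replaces A's four separate nested loop passes over the matrix (one per quadrant) by a single pair of nested loops over the whole matrix that dispatches each element into one of the four quadrant lists; Pre_ only excludes inputs where A raises IndexError (too few rows/columns for the given size).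
import Mathlib
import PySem

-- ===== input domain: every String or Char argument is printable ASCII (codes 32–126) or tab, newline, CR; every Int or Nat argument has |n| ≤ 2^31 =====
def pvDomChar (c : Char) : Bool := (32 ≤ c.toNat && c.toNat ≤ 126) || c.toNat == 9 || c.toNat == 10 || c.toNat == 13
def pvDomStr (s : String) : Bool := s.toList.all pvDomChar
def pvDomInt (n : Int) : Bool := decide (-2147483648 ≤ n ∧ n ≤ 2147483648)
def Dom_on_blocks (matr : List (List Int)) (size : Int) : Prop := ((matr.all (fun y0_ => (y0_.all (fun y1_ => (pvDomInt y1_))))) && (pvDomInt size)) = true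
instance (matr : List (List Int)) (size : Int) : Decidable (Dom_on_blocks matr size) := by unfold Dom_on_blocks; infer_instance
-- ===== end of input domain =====

-- B makes ONE pair of nested loops over the whole matrix and dispatches each element into one of
-- the four quadrant lists, instead of A's four separate nested loop passes (same asymptotic cost).

-- ===== PORT A =====
-- matr[row][column]; Pre_ guarantees both indexes are in range, so the defaults are never taken.
def pvAt (matr : List (List Int)) (row column : Int) : Int :=
  PySem.List.pyGetD (PySem.List.pyGetD matr row []) column 0

def on_blocks (matr : List (List Int)) (size : Int) : List Int × List Int × List Int × List Int :=
  let half : Int := PySem.Int.truncdiv size 2   -- int(size / 2); exact: |size| ≤ 2^31 < 2^53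
  let first := (PySem.List.pyRange 0 half 1).foldl (fun acc row =>
    (PySem.List.pyRange 0 half 1).foldl (fun acc column => acc ++ [pvAt matr row column]) acc) []
  let second := (PySem.List.pyRange 0 half 1).foldl (fun acc row =>
    (PySem.List.pyRange half size 1).foldl (fun acc column => acc ++ [pvAt matr row column]) acc) []
  let third := (PySem.List.pyRange half size 1).foldl (fun acc row =>
    (PySem.List.pyRange 0 half 1).foldl (fun acc column => acc ++ [pvAt matr row column]) acc) []
  let fourth := (PySem.List.pyRange half size 1).foldl (fun acc row =>
    (PySem.List.pyRange half size 1).foldl (fun acc column => acc ++ [pvAt matr row column]) acc) []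
  (first, second, third, fourth)

-- ===== PORT B =====
-- _dispatch of Source B, functionalised: it returns the updated quadruple instead of mutating it.
def pvStep (matr : List (List Int)) (half row : Int)
    (st : List Int × List Int × List Int × List Int) (column : Int) :
    List Int × List Int × List Int × List Int :=
  let v := pvAt matr row column
  if row < half then
    if column < half then (st.1 ++ [v], st.2.1, st.2.2.1, st.2.2.2)
    else (st.1, st.2.1 ++ [v], st.2.2.1, st.2.2.2)
  else
    if column < half then (st.1, st.2.1, st.2.2.1 ++ [v], st.2.2.2)
    else (st.1, st.2.1, st.2.2.1, st.2.2.2 ++ [v])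

def on_blocks_alt (matr : List (List Int)) (size : Int) : List Int × List Int × List Int × List Int :=
  let half : Int := PySem.Int.truncdiv size 2
  (PySem.List.pyRange 0 size 1).foldl (fun st row =>
    (PySem.List.pyRange 0 size 1).foldl (pvStep matr half row) st) ([], [], [], [])

-- ===== PRECONDITION & SPEC =====
-- Pre_ excludes exactly the inputs where Python A raises IndexError: for positive size,
-- A reads matr[row][column] for all 0 ≤ row, column < size, so it needs size rows of length ≥ size.
def Pre_on_blocks (matr : List (List Int)) (size : Int) : Prop :=
  size ≤ 0 ∨ (size ≤ (matr.length : Int) ∧ ∀ r ∈ matr.take size.toNat, size ≤ (r.length : Int))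
instance (matr : List (List Int)) (size : Int) : Decidable (Pre_on_blocks matr size) := by
  unfold Pre_on_blocks; infer_instance

def pvWitness_on_blocks : List (List Int) × Int := ([[1, 2], [3, 4]], 2)

def Spec_on_blocks (matr : List (List Int)) (size : Int) (out : List Int × List Int × List Int × List Int) : Prop := out = on_blocks_alt matr size
instance (matr : List (List Int)) (size : Int) (out : List Int × List Int × List Int × List Int) : Decidable (Spec_on_blocks matr size out) := by unfold Spec_on_blocks; infer_instance

-- ===== CLAIM (what is proved, stated in full; the proofs are below) =====
def Claim_equal_on_blocks : Prop := ∀ (matr : List (List Int)) (size : Int), Dom_on_blocks matr size → Pre_on_blocks matr size → Spec_on_blocks matr size (on_blocks matr size)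

-- ===== LEMMAS AND PROOFS =====

-- the four "append to one component" accumulator shapes of B's inner loop
theorem pvQuad1 (f : Int → Int) (l : List Int) (a b c d : List Int) :
    l.foldl (fun st x => (st.1 ++ [f x], st.2.1, st.2.2.1, st.2.2.2)) (a, b, c, d)
      = (a ++ l.map f, b, c, d) := by
  induction l generalizing a with
  | nil => simp
  | cons x xs ih => simp [List.foldl_cons, ih]

theorem pvQuad2 (f : Int → Int) (l : List Int) (a b c d : List Int) :
    l.foldl (fun st x => (st.1, st.2.1 ++ [f x], st.2.2.1, st.2.2.2)) (a, b, c, d)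
      = (a, b ++ l.map f, c, d) := by
  induction l generalizing b with
  | nil => simp
  | cons x xs ih => simp [List.foldl_cons, ih]

theorem pvQuad3 (f : Int → Int) (l : List Int) (a b c d : List Int) :
    l.foldl (fun st x => (st.1, st.2.1, st.2.2.1 ++ [f x], st.2.2.2)) (a, b, c, d)
      = (a, b, c ++ l.map f, d) := by
  induction l generalizing c with
  | nil => simp
  | cons x xs ih => simp [List.foldl_cons, ih]

theorem pvQuad4 (f : Int → Int) (l : List Int) (a b c d : List Int) :
    l.foldl (fun st x => (st.1, st.2.1, st.2.2.1, st.2.2.2 ++ [f x])) (a, b, c, d)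
      = (a, b, c, d ++ l.map f) := by
  induction l generalizing d with
  | nil => simp
  | cons x xs ih => simp [List.foldl_cons, ih]

-- B's inner loop over one (split) row of columns, row in the TOP half
theorem pvInnerTop (matr : List (List Int)) (half size row : Int)
    (hr : row < half) (a b c d : List Int) :
    (PySem.List.pyRange 0 half 1 ++ PySem.List.pyRange half size 1).foldl
        (pvStep matr half row) (a, b, c, d)
    = (a ++ (PySem.List.pyRange 0 half 1).map (pvAt matr row),
       b ++ (PySem.List.pyRange half size 1).map (pvAt matr row), c, d) := by
  rw [List.foldl_append]
  have h1 : ∀ (st : List Int × List Int × List Int × List Int) (x : Int),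
      x ∈ PySem.List.pyRange 0 half 1 →
      pvStep matr half row st x = (st.1 ++ [pvAt matr row x], st.2.1, st.2.2.1, st.2.2.2) := by
    intro st x hx
    have hxh := (PySem.List.mem_pyRange_one.mp hx).2
    simp only [pvStep, if_pos hr, if_pos hxh]
  rw [PySem.List.foldl_congr_mem _ _ _ _ h1, pvQuad1]
  have h2 : ∀ (st : List Int × List Int × List Int × List Int) (x : Int),
      x ∈ PySem.List.pyRange half size 1 →
      pvStep matr half row st x = (st.1, st.2.1 ++ [pvAt matr row x], st.2.2.1, st.2.2.2) := by
    intro st x hx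
    have hxh := (PySem.List.mem_pyRange_one.mp hx).1
    simp only [pvStep, if_pos hr, if_neg (by omega : ¬ x < half)]
  rw [PySem.List.foldl_congr_mem _ _ _ _ h2, pvQuad2]

-- B's inner loop over one (split) row of columns, row in the BOTTOM half
theorem pvInnerBot (matr : List (List Int)) (half size row : Int)
    (hr : ¬ row < half) (a b c d : List Int) :
    (PySem.List.pyRange 0 half 1 ++ PySem.List.pyRange half size 1).foldl
        (pvStep matr half row) (a, b, c, d)
    = (a, b, c ++ (PySem.List.pyRange 0 half 1).map (pvAt matr row),
       d ++ (PySem.List.pyRange half size 1).map (pvAt matr row)) := by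
  rw [List.foldl_append]
  have h1 : ∀ (st : List Int × List Int × List Int × List Int) (x : Int),
      x ∈ PySem.List.pyRange 0 half 1 →
      pvStep matr half row st x = (st.1, st.2.1, st.2.2.1 ++ [pvAt matr row x], st.2.2.2) := by
    intro st x hx
    have hxh := (PySem.List.mem_pyRange_one.mp hx).2
    simp only [pvStep, if_neg hr, if_pos hxh]
  rw [PySem.List.foldl_congr_mem _ _ _ _ h1, pvQuad3]
  have h2 : ∀ (st : List Int × List Int × List Int × List Int) (x : Int),
      x ∈ PySem.List.pyRange half size 1 →
      pvStep matr half row st x = (st.1, st.2.1, st.2.2.1, st.2.2.2 ++ [pvAt matr row x]) := by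
    intro st x hx
    have hxh := (PySem.List.mem_pyRange_one.mp hx).1
    simp only [pvStep, if_neg hr, if_neg (by omega : ¬ x < half)]
  rw [PySem.List.foldl_congr_mem _ _ _ _ h2, pvQuad4]

-- the outer-loop accumulator shapes (component-wise extension by per-row blocks)
theorem pvOuter12 (F S : Int → List Int) (l : List Int) (a b c d : List Int) :
    l.foldl (fun st r => (st.1 ++ F r, st.2.1 ++ S r, st.2.2.1, st.2.2.2)) (a, b, c, d)
      = (a ++ l.flatMap F, b ++ l.flatMap S, c, d) := by
  induction l generalizing a b with
  | nil => simp
  | cons x xs ih => simp [List.foldl_cons, ih]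

theorem pvOuter34 (F S : Int → List Int) (l : List Int) (a b c d : List Int) :
    l.foldl (fun st r => (st.1, st.2.1, st.2.2.1 ++ F r, st.2.2.2 ++ S r)) (a, b, c, d)
      = (a, b, c ++ l.flatMap F, d ++ l.flatMap S) := by
  induction l generalizing c d with
  | nil => simp
  | cons x xs ih => simp [List.foldl_cons, ih]

-- B's whole double loop, in closed form (generic half with its bounds)
theorem pvFold_eq (matr : List (List Int)) (half size : Int)
    (h0 : 0 ≤ half) (h1 : half ≤ size) :
    (PySem.List.pyRange 0 size 1).foldl (fun st row =>
        (PySem.List.pyRange 0 size 1).foldl (pvStep matr half row) st) ([], [], [], [])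
    = ((PySem.List.pyRange 0 half 1).flatMap
         (fun r => (PySem.List.pyRange 0 half 1).map (pvAt matr r)),
       (PySem.List.pyRange 0 half 1).flatMap
         (fun r => (PySem.List.pyRange half size 1).map (pvAt matr r)),
       (PySem.List.pyRange half size 1).flatMap
         (fun r => (PySem.List.pyRange 0 half 1).map (pvAt matr r)),
       (PySem.List.pyRange half size 1).flatMap
         (fun r => (PySem.List.pyRange half size 1).map (pvAt matr r))) := by
  rw [PySem.List.pyRange_one_append 0 half size h0 h1, List.foldl_append]
  have hTop : ∀ (st : List Int × List Int × List Int × List Int) (r : Int),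
      r ∈ PySem.List.pyRange 0 half 1 →
      (PySem.List.pyRange 0 half 1 ++ PySem.List.pyRange half size 1).foldl
          (pvStep matr half r) st
      = (st.1 ++ (PySem.List.pyRange 0 half 1).map (pvAt matr r),
         st.2.1 ++ (PySem.List.pyRange half size 1).map (pvAt matr r), st.2.2.1, st.2.2.2) := by
    intro st r hrm
    obtain ⟨s1, s2, s3, s4⟩ := st
    exact pvInnerTop matr half size r (PySem.List.mem_pyRange_one.mp hrm).2 s1 s2 s3 s4
  rw [PySem.List.foldl_congr_mem _ _ _ _ hTop, pvOuter12]
  have hBot : ∀ (st : List Int × List Int × List Int × List Int) (r : Int),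
      r ∈ PySem.List.pyRange half size 1 →
      (PySem.List.pyRange 0 half 1 ++ PySem.List.pyRange half size 1).foldl
          (pvStep matr half r) st
      = (st.1, st.2.1, st.2.2.1 ++ (PySem.List.pyRange 0 half 1).map (pvAt matr r),
         st.2.2.2 ++ (PySem.List.pyRange half size 1).map (pvAt matr r)) := by
    intro st r hrm
    obtain ⟨s1, s2, s3, s4⟩ := st
    exact pvInnerBot matr half size r
      (by have := (PySem.List.mem_pyRange_one.mp hrm).1; omega) s1 s2 s3 s4
  rw [PySem.List.foldl_congr_mem _ _ _ _ hBot, pvOuter34]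
  simp

-- A in the same closed form
theorem pvA_eq (matr : List (List Int)) (size : Int) :
    on_blocks matr size =
      ((PySem.List.pyRange 0 (PySem.Int.truncdiv size 2) 1).flatMap
         (fun r => (PySem.List.pyRange 0 (PySem.Int.truncdiv size 2) 1).map (pvAt matr r)),
       (PySem.List.pyRange 0 (PySem.Int.truncdiv size 2) 1).flatMap
         (fun r => (PySem.List.pyRange (PySem.Int.truncdiv size 2) size 1).map (pvAt matr r)),
       (PySem.List.pyRange (PySem.Int.truncdiv size 2) size 1).flatMap
         (fun r => (PySem.List.pyRange 0 (PySem.Int.truncdiv size 2) 1).map (pvAt matr r)),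
       (PySem.List.pyRange (PySem.Int.truncdiv size 2) size 1).flatMap
         (fun r => (PySem.List.pyRange (PySem.Int.truncdiv size 2) size 1).map (pvAt matr r))) := by
  unfold on_blocks
  simp only [PySem.List.foldl_append_singleton_eq_map, PySem.List.foldl_append_eq_flatMap,
    List.nil_append]

-- bounds for half = int(size / 2) (PySem.Int.truncdiv _ 2 is Int.tdiv _ 2 by definition)
theorem pvHalf_bounds_pos (size : Int) (h : 0 ≤ size) :
    0 ≤ PySem.Int.truncdiv size 2 ∧ PySem.Int.truncdiv size 2 ≤ size := by
  have he : PySem.Int.truncdiv size 2 = size.tdiv 2 := rfl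
  rw [he, Int.tdiv_eq_ediv_of_nonneg h]; omega

theorem pvHalf_bounds_neg (size : Int) (h : size ≤ 0) :
    size ≤ PySem.Int.truncdiv size 2 ∧ PySem.Int.truncdiv size 2 ≤ 0 := by
  have he : PySem.Int.truncdiv size 2 = -((-size).tdiv 2) := by
    show size.tdiv 2 = _; rw [Int.neg_tdiv]; ring
  rw [he, Int.tdiv_eq_ediv_of_nonneg (by omega)]; omega

-- ===== VERDICT (by name: the statement is the Claim_ definition above) =====
theorem on_blocks_spec : Claim_equal_on_blocks := by
  intro matr size _ _
  unfold Spec_on_blocks on_blocks_alt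
  by_cases hs : 0 ≤ size
  · obtain ⟨h0, h1⟩ := pvHalf_bounds_pos size hs
    rw [pvA_eq, pvFold_eq matr (PySem.Int.truncdiv size 2) size h0 h1]
  · obtain ⟨h0, h1⟩ := pvHalf_bounds_neg size (by omega)
    rw [pvA_eq]
    rw [PySem.List.pyRange_one_eq_nil (by omega : size ≤ (0 : Int))]
    rw [PySem.List.pyRange_one_eq_nil (h1 : PySem.Int.truncdiv size 2 ≤ 0),
        PySem.List.pyRange_one_eq_nil (h0 : size ≤ PySem.Int.truncdiv size 2)]
    simp
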